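-- pv_equiv track=rewrite | github.com/666ren666/fisrt_website_ran | start_game_logic.py | take_cards_into_hand
-- ===== SOURCE A (Python) =====
-- def take_cards_into_hand(player_deck):
--     i = 0
--     player_hand = []
--     while i < 5:
--         if player_deck == []:
--             break
--         else:
--             popped_card = player_deck.pop(0)
--             player_hand.append(popped_card)
--             i += 1
--     return player_hand
-- ===== SOURCE B (Python) =====
-- def take_cards_into_hand(player_deck):
--     player_hand = player_deck[:5]
--     del player_deck[:5]
--     return player_hand
-- ===== Notes on version B (the rewrite author's own statement) =====
-- stated objective: idiomatic
-- what changed: Replaces the counting while-loop with repeated pop(0) by a single slice player_deck[:5] plus an in-place del player_deck[:5], keeping the same mutation of the caller's list.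
import Mathlib
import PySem

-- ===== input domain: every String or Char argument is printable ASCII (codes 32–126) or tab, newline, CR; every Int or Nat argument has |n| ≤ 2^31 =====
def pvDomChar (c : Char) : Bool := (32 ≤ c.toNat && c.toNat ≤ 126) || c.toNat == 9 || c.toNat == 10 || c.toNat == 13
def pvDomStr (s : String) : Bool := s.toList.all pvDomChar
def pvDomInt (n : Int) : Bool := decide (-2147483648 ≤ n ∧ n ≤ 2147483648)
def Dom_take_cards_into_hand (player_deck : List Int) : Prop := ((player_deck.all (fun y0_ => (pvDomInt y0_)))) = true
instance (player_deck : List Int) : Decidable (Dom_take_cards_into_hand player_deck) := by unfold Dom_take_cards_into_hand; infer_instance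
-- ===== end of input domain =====

-- B replaces A's counting while-loop of pop(0) by one slice plus an in-place del (idiomatic);
-- both mutate the caller's list identically in Python, the equivalence here is about the return value.

-- ===== PORT A =====
-- while i < 5: if deck == [] break else pop front, append to hand, i += 1
def takeCardsLoop (i : Nat) (player_deck player_hand : List Int) : List Int :=
  if i < 5 then
    match player_deck with
    | [] => player_hand
    | popped_card :: rest => takeCardsLoop (i + 1) rest (player_hand ++ [popped_card])
  else player_hand
termination_by 5 - i

def take_cards_into_hand (player_deck : List Int) : List Int :=
  takeCardsLoop 0 player_deck []

-- ===== PORT B =====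
-- player_hand = player_deck[:5]; return player_hand
def take_cards_into_hand_alt (player_deck : List Int) : List Int :=
  PySem.List.slice player_deck none (some 5)

-- ===== PRECONDITION & SPEC =====
def Spec_take_cards_into_hand (player_deck : List Int) (out : List Int) : Prop := out = take_cards_into_hand_alt player_deck
instance (player_deck : List Int) (out : List Int) : Decidable (Spec_take_cards_into_hand player_deck out) := by unfold Spec_take_cards_into_hand; infer_instance

-- ===== CLAIM (what is proved, stated in full; the proofs are below) =====
def Claim_equal_take_cards_into_hand : Prop := ∀ (player_deck : List Int), Dom_take_cards_into_hand player_deck → Spec_take_cards_into_hand player_deck (take_cards_into_hand player_deck)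

-- ===== LEMMAS AND PROOFS =====
theorem takeCardsLoop_eq (i : Nat) (deck hand : List Int) :
    takeCardsLoop i deck hand = hand ++ deck.take (5 - i) := by
  induction deck generalizing i hand with
  | nil => unfold takeCardsLoop; split <;> simp
  | cons c rest ih =>
    unfold takeCardsLoop
    split
    · rename_i h
      show takeCardsLoop (i + 1) rest (hand ++ [c]) = hand ++ List.take (5 - i) (c :: rest)
      rw [ih]
      have : 5 - i = (5 - (i + 1)) + 1 := by omega
      simp [this]
    · rename_i h
      have : 5 - i = 0 := by omega
      simp [this]

-- ===== VERDICT (by name: the statement is the Claim_ definition above) =====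
theorem take_cards_into_hand_spec : Claim_equal_take_cards_into_hand := by
  intro deck _
  unfold Spec_take_cards_into_hand take_cards_into_hand take_cards_into_hand_alt
  rw [takeCardsLoop_eq]
  have : PySem.List.slice deck none (some ((5:Nat):Int)) = deck.take 5 :=
    PySem.List.slice_to_natCast deck 5
  simp at this
  simp [this]
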